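-- pv_equiv track=rewrite | github.com/iseppi/cloudflare-pyworker-dyndns2 | src/main.py | _is_valid_fqdn
-- ===== SOURCE A (Python) =====
-- def _is_valid_fqdn(hostname):
--     """Basic validation that a hostname looks like an FQDN."""
--     if not hostname or "." not in hostname:
--         return False
--     labels = hostname.split(".")
--     for label in labels:
--         if not label or len(label) > 63:
--             return False
--         if not all(c.isalnum() or c == "-" for c in label):
--             return False
--         if label.startswith("-") or label.endswith("-"):
--             return False
--     return True
-- ===== SOURCE B (Python) =====
-- def _is_valid_fqdn(hostname):
--     """Basic validation that a hostname looks like an FQDN (single pass, no split)."""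
--     n = 0              # length of the label currently being read
--     dots = 0           # separators seen so far
--     prev_hyphen = False
--     for c in hostname:
--         if c == ".":
--             if n == 0 or prev_hyphen:
--                 return False
--             dots += 1
--             n = 0
--             prev_hyphen = False
--         else:
--             if not (c.isalnum() or c == "-"):
--                 return False
--             if n == 0 and c == "-":
--                 return False
--             n += 1
--             if n > 63:
--                 return False
--             prev_hyphen = (c == "-")
--     return dots >= 1 and n >= 1 and not prev_hyphen
-- ===== Notes on version B (the rewrite author's own statement) =====
-- stated objective: alternative
-- what changed: Replaces split-into-labels plus a per-label loop with three passes over each label (char scan, startswith/endswith) by a single left-to-right character scan that tracks the current label length, the dot count and whether the previous character was a hyphen.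
import Mathlib
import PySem

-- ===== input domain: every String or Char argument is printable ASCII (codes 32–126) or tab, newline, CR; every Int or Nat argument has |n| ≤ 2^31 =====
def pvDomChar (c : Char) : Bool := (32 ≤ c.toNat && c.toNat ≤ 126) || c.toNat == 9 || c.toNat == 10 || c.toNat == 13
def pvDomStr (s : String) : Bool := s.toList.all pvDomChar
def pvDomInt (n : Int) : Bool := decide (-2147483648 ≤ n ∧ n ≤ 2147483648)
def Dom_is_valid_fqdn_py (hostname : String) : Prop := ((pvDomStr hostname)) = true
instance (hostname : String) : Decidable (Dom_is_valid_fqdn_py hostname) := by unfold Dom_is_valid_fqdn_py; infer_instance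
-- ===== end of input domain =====

-- B replaces A's split-into-labels with per-label passes by one single left-to-right
-- character scan tracking label length, dot count and a previous-hyphen flag (alternative,
-- same O(n) cost). Return-value equivalence is proved for every input (A is total).

-- ===== PORT A =====
-- per-character test shared by both Pythons: c.isalnum() or c == "-"
def fqdnOkChar (c : Char) : Bool := PySem.Chars.isalnum c || c == '-'

-- the 'for label in labels' loop of A, early 'return False' = stop with false
def fqdnLoopA : List (List Char) → Bool
  | [] => true
  | label :: rest =>
    if label.isEmpty || decide (63 < label.length) then false
    else if !(label.all fqdnOkChar) then false
    else if PySem.Chars.startswith label ['-'] || PySem.Chars.endswith label ['-'] then false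
    else fqdnLoopA rest

def is_valid_fqdn_py (hostname : String) : Bool :=
  if hostname.toList.isEmpty || !(PySem.Chars.isIn ['.'] hostname.toList) then false
  else fqdnLoopA (PySem.Chars.splitOn hostname.toList ['.'])

-- ===== PORT B =====
-- Source B's for-loop: state (n = current label length, dots, prev_hyphen)
def fqdnScan : List Char → Nat → Nat → Bool → Bool
  | [], n, dots, ph => decide (1 ≤ dots) && decide (1 ≤ n) && !ph
  | c :: rest, n, dots, ph =>
    if c == '.' then
      if n == 0 || ph then false else fqdnScan rest 0 (dots + 1) false
    else if !(fqdnOkChar c) then false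
    else if n == 0 && c == '-' then false
    else if decide (63 < n + 1) then false
    else fqdnScan rest (n + 1) dots (c == '-')

def is_valid_fqdn_py_alt (hostname : String) : Bool :=
  fqdnScan hostname.toList 0 0 false

-- ===== PRECONDITION & SPEC =====
def Spec_is_valid_fqdn_py (hostname : String) (out : Bool) : Prop := out = is_valid_fqdn_py_alt hostname
instance (hostname : String) (out : Bool) : Decidable (Spec_is_valid_fqdn_py hostname out) := by unfold Spec_is_valid_fqdn_py; infer_instance

-- ===== CLAIM (what is proved, stated in full; the proofs are below) =====
def Claim_equal_is_valid_fqdn_py : Prop := ∀ (hostname : String), Dom_is_valid_fqdn_py hostname → Spec_is_valid_fqdn_py hostname (is_valid_fqdn_py hostname)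

-- ===== LEMMAS AND PROOFS =====

-- reference split of a char list on '.', first label prefixed by p
def splitDot (p : List Char) : List Char → List (List Char)
  | [] => [p]
  | c :: rest => if c = '.' then p :: splitDot [] rest else splitDot (p ++ [c]) rest

-- a label passes A's three per-label tests
def goodLabel (l : List Char) : Bool :=
  !l.isEmpty && decide (l.length ≤ 63) && l.all fqdnOkChar
    && l.head? != some '-' && l.getLast? != some '-'

-- B's semantics on the label list, given dots seen so far
def labelsB : Nat → List (List Char) → Bool
  | _, [] => false
  | dots, [l] => goodLabel l && decide (1 ≤ dots)
  | dots, l :: l' :: rest => goodLabel l && labelsB (dots + 1) (l' :: rest)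

theorem splitDot_ne_nil (s p : List Char) : splitDot p s ≠ [] := by
  induction s generalizing p with
  | nil => simp [splitDot]
  | cons c rest ih =>
    simp only [splitDot]
    split <;> simp [ih]

theorem splitOn_go_eq (fuel : Nat) :
    ∀ (l cur : List Char) (acc : List (List Char)),
      l.length ≤ fuel →
      PySem.Chars.splitOn.go ['.'] fuel l cur acc =
        acc.reverse ++ splitDot cur.reverse l := by
  induction fuel with
  | zero =>
    intro l cur acc h
    have : l = [] := List.eq_nil_of_length_eq_zero (Nat.le_zero.mp h)
    subst this
    simp [PySem.Chars.splitOn.go, splitDot]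
  | succ fuel ih =>
    intro l cur acc h
    match l with
    | [] => simp [PySem.Chars.splitOn.go, splitDot]
    | c :: rest =>
      by_cases hc : c = '.'
      · subst hc
        have hpre : List.isPrefixOf ['.'] ('.' :: rest) = true := by
          simp [List.isPrefixOf]
        simp only [PySem.Chars.splitOn.go, hpre, if_pos]
        rw [show List.drop (List.length ['.']) ('.' :: rest) = rest from rfl]
        rw [ih rest [] (cur.reverse :: acc) (by simpa using h)]
        simp [splitDot]
      · have hpre : List.isPrefixOf ['.'] (c :: rest) = false := by
          cases hb : List.isPrefixOf ['.'] (c :: rest)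
          · rfl
          · exfalso
            have := List.isPrefixOf_iff_prefix.mp hb
            rcases this with ⟨t, ht⟩
            simp at ht
            exact hc ht.1.symm
        simp only [PySem.Chars.splitOn.go, hpre, Bool.false_eq_true, if_false]
        rw [ih rest (c :: cur) acc (by simpa using h)]
        simp [splitDot, hc]

theorem splitOn_eq_splitDot (s : List Char) :
    PySem.Chars.splitOn s ['.'] = splitDot [] s := by
  have := splitOn_go_eq (s.length + 1) s [] [] (by omega)
  simpa [PySem.Chars.splitOn] using this

-- the first label of splitDot p s extends p
theorem splitDot_head (s p : List Char) :
    ∃ t L, splitDot p s = (p ++ t) :: L := by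
  induction s generalizing p with
  | nil => exact ⟨[], [], by simp [splitDot]⟩
  | cons c rest ih =>
    by_cases hc : c = '.'
    · exact ⟨[], splitDot [] rest, by simp [splitDot, hc]⟩
    · obtain ⟨t, L, hL⟩ := ih (p ++ [c])
      exact ⟨c :: t, L, by simp [splitDot, hc, hL]⟩

-- a partial label already doomed (bad char, leading hyphen, too long) makes labelsB false
theorem labelsB_false (s p : List Char) (dots : Nat)
    (hbad : p.all fqdnOkChar = false ∨ p.head? = some '-' ∨ 63 < p.length) :
    labelsB dots (splitDot p s) = false := by
  obtain ⟨t, L, hL⟩ := splitDot_head s p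
  have hg : goodLabel (p ++ t) = false := by
    rcases hbad with h | h | h
    · simp only [goodLabel, List.all_append]
      simp [h]
    · have hp : p ≠ [] := by rintro rfl; simp at h
      have : (p ++ t).head? = some '-' := by
        rw [List.head?_append_of_ne_nil _ hp]; exact h
      simp [goodLabel, this]
    · have hlen : decide ((p ++ t).length ≤ 63) = false := by
        simp only [decide_eq_false_iff_not, List.length_append]; omega
      simp only [goodLabel]; rw [hlen]; simp
  rw [hL]
  match L with
  | [] => simp [labelsB, hg]
  | l' :: rest => simp [labelsB, hg]

theorem startswith_singleton (l : List Char) (a : Char) :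
    PySem.Chars.startswith l [a] = (l.head? == some a) := by
  by_cases h : [a] <+: l
  · rw [(PySem.Chars.startswith_iff l [a]).mpr h]
    obtain ⟨t, rfl⟩ := h; simp
  · have h1 : PySem.Chars.startswith l [a] = false := by
      cases hb : PySem.Chars.startswith l [a]
      · rfl
      · exact absurd ((PySem.Chars.startswith_iff l [a]).mp hb) h
    rw [h1]
    cases l with
    | nil => simp
    | cons c rest =>
      have : c ≠ a := by rintro rfl; exact h ⟨rest, rfl⟩
      simpa using this

theorem endswith_singleton (l : List Char) (a : Char) :
    PySem.Chars.endswith l [a] = (l.getLast? == some a) := by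
  by_cases h : [a] <:+ l
  · rw [(PySem.Chars.endswith_iff l [a]).mpr h]
    obtain ⟨t, rfl⟩ := h; simp
  · have h1 : PySem.Chars.endswith l [a] = false := by
      cases hb : PySem.Chars.endswith l [a]
      · rfl
      · exact absurd ((PySem.Chars.endswith_iff l [a]).mp hb) h
    rw [h1]
    symm
    simp only [beq_eq_false_iff_ne, ne_eq]
    intro hlast
    rcases List.getLast?_eq_some_iff.mp hlast with ⟨ys, rfl⟩
    exact h ⟨ys, rfl⟩

-- A's label loop is List.all goodLabel
theorem fqdnLoopA_eq_all (L : List (List Char)) : fqdnLoopA L = L.all goodLabel := by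
  induction L with
  | nil => simp [fqdnLoopA]
  | cons label rest ih =>
    simp only [fqdnLoopA, List.all_cons]
    rw [startswith_singleton, endswith_singleton]
    by_cases h1 : label.isEmpty ∨ 63 < label.length
    · have hg : goodLabel label = false := by
        rcases h1 with h | h
        · simp [goodLabel, h]
        · have : ¬ label.length ≤ 63 := by omega
          simp [goodLabel, this]
      have : (label.isEmpty || decide (63 < label.length)) = true := by
        rcases h1 with h | h <;> simp [h]
      simp [this, hg]
    · push_neg at h1
      have he : label.isEmpty = false := by simpa using h1.1
      have hlen : label.length ≤ 63 := by omega
      simp only [he, Bool.false_or, decide_eq_true_eq]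
      rw [if_neg (by omega)]
      by_cases h2 : label.all fqdnOkChar
      · simp only [h2, Bool.not_true, Bool.false_eq_true, if_false]
        by_cases h3 : label.head? = some '-' ∨ label.getLast? = some '-'
        · have hg : goodLabel label = false := by
            rcases h3 with h | h <;> simp [goodLabel, h]
          have : (label.head? == some '-' || label.getLast? == some '-') = true := by
            rcases h3 with h | h <;> simp [h]
          simp [this, hg]
        · push_neg at h3
          have hg : goodLabel label = true := by
            simp [goodLabel, he, hlen, h2, h3.1, h3.2]
          simp [h3.1, h3.2, hg, ih]
      · have hg : goodLabel label = false := by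
          simp only [goodLabel]
          simp [show label.all fqdnOkChar = false from by simpa using h2]
        simp [show label.all fqdnOkChar = false from by simpa using h2, hg]

-- main invariant: the scan from a valid partial label p computes labelsB on splitDot p s
theorem scan_eq_labelsB (s : List Char) :
    ∀ (p : List Char) (dots : Nat),
      p.all fqdnOkChar = true → p.head? ≠ some '-' → p.length ≤ 63 →
      fqdnScan s p.length dots (p.getLast? == some '-') = labelsB dots (splitDot p s) := by
  induction s with
  | nil =>
    intro p dots hall hhead hlen
    have hh' : (p.head? == some '-') = false := by simpa using hhead
    simp only [fqdnScan, splitDot, labelsB, goodLabel, bne]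
    by_cases hp : p = []
    · subst hp; simp
    · have h1 : p.isEmpty = false := by simpa using hp
      have h2 : (1 ≤ p.length) := by
        cases p; exact absurd rfl hp; simp
      simp [h1, hall, hh', hlen, h2, Bool.and_comm]
  | cons c rest ih =>
    intro p dots hall hhead hlen
    by_cases hc : c = '.'
    · subst hc
      have hstep : fqdnScan ('.' :: rest) p.length dots (p.getLast? == some '-') =
          if (p.length == 0 || (p.getLast? == some '-')) then false
          else fqdnScan rest 0 (dots + 1) false := by
        simp [fqdnScan]
      have hsplit : splitDot p ('.' :: rest) = p :: splitDot [] rest := by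
        simp [splitDot]
      obtain ⟨l', L', hL⟩ : ∃ l' L', splitDot ([] : List Char) rest = l' :: L' := by
        cases hS : splitDot ([] : List Char) rest
        · exact absurd hS (splitDot_ne_nil rest [])
        · exact ⟨_, _, rfl⟩
      rw [hstep, hsplit, hL]
      rw [show labelsB dots (p :: l' :: L') = (goodLabel p && labelsB (dots + 1) (l' :: L')) from rfl]
      by_cases hbad : p.length = 0 ∨ p.getLast? = some '-'
      · have hcond : (p.length == 0 || (p.getLast? == some '-')) = true := by
          rcases hbad with h | h <;> simp [h]
        rw [if_pos hcond]
        have hg : goodLabel p = false := by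
          rcases hbad with h | h
          · have hp : p = [] := List.eq_nil_of_length_eq_zero h
            simp [goodLabel, hp]
          · simp [goodLabel, h]
        simp [hg]
      · push_neg at hbad
        have hp : p ≠ [] := fun h => hbad.1 (by simp [h])
        rw [if_neg (by simp [hbad.1, hbad.2])]
        have hg : goodLabel p = true := by
          have h1 : p.isEmpty = false := by simpa using hp
          have hh : (p.head? != some '-') = true := by simpa using hhead
          have hl : (p.getLast? != some '-') = true := by simpa using hbad.2
          simp [goodLabel, h1, hall, hh, hl, hlen]
        have hrec := ih [] (dots + 1) (by simp) (by simp) (by simp)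
        simp only [List.length_nil, List.getLast?_nil] at hrec
        rw [show ((none : Option Char) == some '-') = false from rfl] at hrec
        rw [hrec, hL, hg]
        simp
    · have hstep : fqdnScan (c :: rest) p.length dots (p.getLast? == some '-') =
          if !(fqdnOkChar c) then false
          else if (p.length == 0 && (c == '-')) then false
          else if decide (63 < p.length + 1) then false
          else fqdnScan rest (p.length + 1) dots (c == '-') := by
        simp [fqdnScan, hc]
      have hsplit : splitDot p (c :: rest) = splitDot (p ++ [c]) rest := by
        simp [splitDot, hc]
      rw [hstep, hsplit]
      by_cases hok : fqdnOkChar c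
      · rw [if_neg (by simp [hok])]
        by_cases hlead : p.length = 0 ∧ c = '-'
        · rw [if_pos (by simp [hlead.1, hlead.2])]
          have hp : p = [] := List.eq_nil_of_length_eq_zero hlead.1
          subst hp
          rw [List.nil_append]
          exact (labelsB_false rest [c] dots (Or.inr (Or.inl (by simp [hlead.2])))).symm
        · rw [if_neg (by
            simp only [Bool.and_eq_true, beq_iff_eq]
            exact fun h => hlead ⟨h.1, h.2⟩)]
          by_cases hlong : 63 < p.length + 1
          · rw [if_pos (by simpa using hlong)]
            exact (labelsB_false rest (p ++ [c]) dots (Or.inr (Or.inr (by simp; omega)))).symm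
          · rw [if_neg (by simpa using hlong)]
            have hall' : (p ++ [c]).all fqdnOkChar = true := by
              simp [List.all_append, hall, hok]
            have hhead' : (p ++ [c]).head? ≠ some '-' := by
              cases hp : p with
              | nil =>
                have hcne : c ≠ '-' := fun h => hlead ⟨by simp [hp], h⟩
                simp [hcne]
              | cons d q =>
                rw [List.head?_append_of_ne_nil _ (by simp)]
                rw [hp] at hhead; exact hhead
            have hlen' : (p ++ [c]).length ≤ 63 := by simp; omega
            have hrec := ih (p ++ [c]) dots hall' hhead' hlen'
            have hlast : (p ++ [c]).getLast? = some c := by simp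
            rw [hlast] at hrec
            have hlenpc : (p ++ [c]).length = p.length + 1 := by simp
            rw [hlenpc] at hrec
            exact hrec
      · have hok' : fqdnOkChar c = false := by simpa using hok
        rw [if_pos (by simp [hok'])]
        exact (labelsB_false rest (p ++ [c]) dots (Or.inl (by simp [List.all_append, hok']))).symm

-- labelsB in closed form on a nonempty label list
theorem labelsB_closed (L : List (List Char)) (hL : L ≠ []) (dots : Nat) :
    labelsB dots L = (L.all goodLabel && decide (1 ≤ dots + (L.length - 1))) := by
  induction L generalizing dots with
  | nil => exact absurd rfl hL
  | cons l rest ih =>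
    match rest with
    | [] => simp [labelsB]
    | l' :: rest' =>
      rw [show labelsB dots (l :: l' :: rest') = (goodLabel l && labelsB (dots + 1) (l' :: rest')) from rfl]
      rw [ih (by simp)]
      simp only [List.all_cons, List.length_cons]
      cases goodLabel l <;> cases goodLabel l' <;> cases rest'.all goodLabel <;>
        simp <;> (try omega)

-- '.' occurs in s iff splitDot yields at least two labels
theorem dot_mem_iff_two_labels (s : List Char) :
    ∀ p, ('.' ∈ s ↔ 2 ≤ (splitDot p s).length) := by
  induction s with
  | nil => intro p; simp [splitDot]
  | cons c rest ih =>
    intro p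
    by_cases hc : c = '.'
    · subst hc
      have hsplit : splitDot p ('.' :: rest) = p :: splitDot [] rest := by simp [splitDot]
      rw [hsplit]
      have h1 : 1 ≤ (splitDot ([] : List Char) rest).length := by
        cases h : splitDot ([] : List Char) rest
        · exact absurd h (splitDot_ne_nil rest [])
        · simp
      simp only [List.length_cons, List.mem_cons]
      constructor
      · intro _; omega
      · intro _; left; trivial
    · have hsplit : splitDot p (c :: rest) = splitDot (p ++ [c]) rest := by simp [splitDot, hc]
      rw [hsplit, List.mem_cons]
      constructor
      · rintro (h | h)
        · exact absurd h.symm hc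
        · exact (ih (p ++ [c])).mp h
      · intro h; exact Or.inr ((ih (p ++ [c])).mpr h)

-- ===== VERDICT (by name: the statement is the Claim_ definition above) =====
theorem is_valid_fqdn_py_spec : Claim_equal_is_valid_fqdn_py := by
  intro hostname _
  unfold Spec_is_valid_fqdn_py
  unfold is_valid_fqdn_py is_valid_fqdn_py_alt
  set s := hostname.toList with hs
  have hB : fqdnScan s 0 0 false = labelsB 0 (splitDot [] s) := by
    have := scan_eq_labelsB s [] 0 (by simp) (by simp) (by simp)
    simpa using this
  rw [hB, splitOn_eq_splitDot]
  rw [labelsB_closed _ (splitDot_ne_nil s []) 0]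
  by_cases hmem : '.' ∈ s
  · have hin : PySem.Chars.isIn ['.'] s = true := by
      rw [PySem.Chars.isIn_iff_infix _ _]
      exact (List.singleton_infix_iff _ _).mpr hmem
    have hne : s.isEmpty = false := by
      have := List.ne_nil_of_mem hmem
      simpa using this
    have h2 : 2 ≤ (splitDot [] s).length := (dot_mem_iff_two_labels s []).mp hmem
    rw [hne, hin]
    simp only [Bool.not_true, Bool.or_false, Bool.false_eq_true, if_false]
    rw [fqdnLoopA_eq_all]
    have : decide (1 ≤ 0 + ((splitDot [] s).length - 1)) = true := by
      simp only [Nat.zero_add, decide_eq_true_eq]; omega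
    rw [this, Bool.and_true]
  · have hin : PySem.Chars.isIn ['.'] s = false := by
      cases hb : PySem.Chars.isIn ['.'] s
      · rfl
      · exact absurd ((List.singleton_infix_iff _ _).mp ((PySem.Chars.isIn_iff_infix _ _).mp hb)) hmem
    have h1 : (splitDot [] s).length < 2 := by
      by_contra h
      exact hmem ((dot_mem_iff_two_labels s []).mpr (by omega))
    have h1' : (splitDot [] s).length = 1 := by
      have hge : 1 ≤ (splitDot ([] : List Char) s).length := by
        cases h : splitDot ([] : List Char) s
        · exact absurd h (splitDot_ne_nil s [])
        · simp
      omega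
    rw [hin]
    have : decide (1 ≤ 0 + ((splitDot [] s).length - 1)) = false := by
      rw [h1']
      decide
    rw [this, Bool.and_false]
    simp
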